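-- pv_equiv track=rewrite | github.com/raghuchouhan/GFGProblemOfTheDay | Easy/Rightmost different bit/rightmost-different-bit.py | posOfRightMostDiffBit
-- ===== SOURCE A (Python) =====
-- def posOfRightMostDiffBit(m, n):
--     # If both numbers are the same, return -1.
--     if m == n:
--         return -1
--
--     # XOR the two numbers to find the differing bits.
--     xor_result = m ^ n
--
--     # Find the position of the rightmost set bit in the XOR result.
--     pos = 1
--     while (xor_result & 1) == 0:
--         xor_result >>= 1
--         pos += 1
--
--     return pos
-- ===== SOURCE B (Python) =====
-- def posOfRightMostDiffBit(m, n):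
--     if m == n:
--         return -1
--     xor = m ^ n
--     # isolate the lowest set bit and read off its 1-indexed position
--     return (xor & -xor).bit_length()
-- ===== Notes on version B (the rewrite author's own statement) =====
-- stated objective: idiomatic
-- what changed: Replaces the bit-by-bit while loop with a loop-free closed form: isolate the lowest set bit of m^n with xor & -xor and return its bit_length.
import Mathlib
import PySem

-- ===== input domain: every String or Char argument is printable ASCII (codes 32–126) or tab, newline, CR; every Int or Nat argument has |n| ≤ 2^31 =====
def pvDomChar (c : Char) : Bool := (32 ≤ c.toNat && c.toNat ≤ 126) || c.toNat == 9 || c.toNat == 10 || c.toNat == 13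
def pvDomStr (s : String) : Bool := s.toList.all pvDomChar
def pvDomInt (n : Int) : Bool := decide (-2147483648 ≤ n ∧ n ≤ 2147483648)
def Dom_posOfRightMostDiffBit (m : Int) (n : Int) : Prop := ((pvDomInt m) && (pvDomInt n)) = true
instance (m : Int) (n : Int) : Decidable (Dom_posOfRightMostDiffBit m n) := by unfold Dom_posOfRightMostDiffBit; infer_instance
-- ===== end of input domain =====

-- B replaces A's bit-by-bit while loop with the loop-free closed form (xor & -xor).bit_length(); objective: idiomatic.

-- Termination helper for the A-side loop (cited by decreasing_by): shifting a nonzero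
-- even integer right by one shrinks its absolute value.
theorem pvShiftAbsLt (x : Int) (hx : x ≠ 0) (he : PySem.Int.band x 1 = 0) :
    (x >>> (1 : Nat)).natAbs < x.natAbs := by
  rw [PySem.Int.band_one] at he
  have he' : x % 2 = 0 := by
    have h2 : PySem.Int.mod x 2 = x % 2 := by
      show x.fmod 2 = x % 2
      rw [Int.fmod_eq_emod]; omega
    omega
  cases x with
  | ofNat a =>
    show (Int.ofNat (a >>> 1)).natAbs < (Int.ofNat a).natAbs
    have ha : a ≠ 0 := by
      intro h; exact hx (by rw [h]; rfl)
    rw [Nat.shiftRight_succ, Nat.shiftRight_zero, Int.ofNat_eq_natCast, Int.ofNat_eq_natCast]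
    omega
  | negSucc m =>
    show (Int.negSucc (m >>> 1)).natAbs < (Int.negSucc m).natAbs
    have hm : m % 2 = 1 := by
      have := Int.negSucc_eq m ▸ he'
      omega
    rw [Nat.shiftRight_succ, Nat.shiftRight_zero]
    simp only [Int.natAbs_negSucc]
    omega

-- ===== PORT A =====
-- A's while loop; the `x = 0` branch is a totality guard only (Python loops forever
-- there; the entry calls pvLoopA with x = m ^ n ≠ 0 since m ≠ n).
def pvLoopA (x : Int) (pos : Int) : Int :=
  if _hx : x = 0 then pos
  else if _he : PySem.Int.band x 1 = 0 then pvLoopA (x >>> (1 : Nat)) (pos + 1) else pos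
termination_by x.natAbs
decreasing_by exact pvShiftAbsLt x _hx _he

def posOfRightMostDiffBit (m : Int) (n : Int) : Int :=
  if m = n then -1
  else pvLoopA (PySem.Int.bxor m n) 1

-- ===== PORT B =====
def posOfRightMostDiffBit_alt (m : Int) (n : Int) : Int :=
  if m = n then -1
  else
    let xor := PySem.Int.bxor m n
    ((PySem.Int.bitLength (PySem.Int.band xor (-xor)) : Nat) : Int)

-- ===== PRECONDITION & SPEC =====
def Spec_posOfRightMostDiffBit (m : Int) (n : Int) (out : Int) : Prop := out = posOfRightMostDiffBit_alt m n
instance (m : Int) (n : Int) (out : Int) : Decidable (Spec_posOfRightMostDiffBit m n out) := by unfold Spec_posOfRightMostDiffBit; infer_instance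

-- ===== CLAIM (what is proved, stated in full; the proofs are below) =====
def Claim_equal_posOfRightMostDiffBit : Prop := ∀ (m : Int) (n : Int), Dom_posOfRightMostDiffBit m n → Spec_posOfRightMostDiffBit m n (posOfRightMostDiffBit m n)

-- ===== LEMMAS AND PROOFS =====

theorem pvFmodTwo (x : Int) : x.fmod 2 = x % 2 := by
  rw [Int.fmod_eq_emod]; omega

theorem pvFdivTwo (x : Int) : x.fdiv 2 = x / 2 := by
  rw [Int.fdiv_eq_ediv]; omega

-- Nat: for odd a, a AND (a-1) clears exactly the low bit.
theorem pvNatAndPredOdd (a : Nat) (h : a % 2 = 1) : a &&& (a - 1) = a - 1 := by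
  apply Nat.eq_of_testBit_eq
  intro i
  rw [Nat.testBit_and]
  cases i with
  | zero =>
    have h1 : (a - 1) % 2 = 0 := by omega
    simp [Nat.testBit_zero, h, h1]
  | succ j =>
    simp only [Nat.testBit_succ]
    have h2 : (a - 1) / 2 = a / 2 := by omega
    rw [h2]
    simp

-- Nat: a AND (a-1) commutes with doubling.
theorem pvNatAndPredDouble (a : Nat) (h : 1 ≤ a) :
    (2 * a) &&& (2 * a - 1) = 2 * (a &&& (a - 1)) := by
  apply Nat.eq_of_testBit_eq
  intro i
  rw [Nat.testBit_and]
  cases i with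
  | zero =>
    have h1 : (2 * a) % 2 = 0 := by omega
    have h2 : (2 * (a &&& (a - 1))) % 2 = 0 := by omega
    simp [Nat.testBit_zero, h1, h2]
  | succ j =>
    simp only [Nat.testBit_succ]
    have h1 : 2 * a / 2 = a := by omega
    have h2 : (2 * a - 1) / 2 = a - 1 := by omega
    have h3 : 2 * (a &&& (a - 1)) / 2 = a &&& (a - 1) := by omega
    rw [h1, h2, h3, Nat.testBit_and]

-- Int: x AND -x in terms of |x|, for nonzero x.
theorem pvBandNegAbs (x : Int) (hx : x ≠ 0) :
    PySem.Int.band x (-x) = ((x.natAbs - (x.natAbs &&& (x.natAbs - 1)) : Nat) : Int) := by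
  unfold PySem.Int.band
  rcases lt_or_gt_of_ne hx with hneg | hpos
  · rw [if_neg (by omega), if_pos (by omega)]
    have e1 : (-x).toNat = x.natAbs := by omega
    have e2 : (-x - 1).toNat = x.natAbs - 1 := by omega
    rw [e1, e2]
  · rw [if_pos (by omega), if_neg (by omega)]
    have e1 : x.toNat = x.natAbs := by omega
    have e2 : (-(-x) - 1).toNat = x.natAbs - 1 := by omega
    rw [e1, e2]

-- Int: odd x has x AND -x = 1.
theorem pvBandNegOdd (x : Int) (hx : x % 2 = 1) : PySem.Int.band x (-x) = 1 := by
  have hne : x ≠ 0 := by omega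
  rw [pvBandNegAbs x hne]
  have ha : x.natAbs % 2 = 1 := by omega
  rw [pvNatAndPredOdd x.natAbs ha]
  have : x.natAbs - (x.natAbs - 1) = 1 := by omega
  rw [this]
  rfl

-- Int: x AND -x commutes with doubling.
theorem pvBandNegDouble (a : Int) : PySem.Int.band (2 * a) (-(2 * a)) = 2 * PySem.Int.band a (-a) := by
  by_cases ha : a = 0
  · subst ha; decide
  · have h2a : (2 : Int) * a ≠ 0 := by omega
    rw [pvBandNegAbs a ha, pvBandNegAbs (2 * a) h2a]
    have e : (2 * a).natAbs = 2 * a.natAbs := by omega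
    rw [e, pvNatAndPredDouble a.natAbs (by omega)]
    have hle : a.natAbs &&& (a.natAbs - 1) ≤ a.natAbs - 1 := Nat.and_le_right
    omega

-- Int: the isolated low bit of a nonzero integer is positive.
theorem pvBandNegPos (x : Int) (hx : x ≠ 0) : 0 < PySem.Int.band x (-x) := by
  rw [pvBandNegAbs x hx]
  have hle : x.natAbs &&& (x.natAbs - 1) ≤ x.natAbs - 1 := Nat.and_le_right
  have : 1 ≤ x.natAbs := by omega
  omega

-- A's loop computes pos - 1 + bit_length of the isolated low bit of x.
theorem pvMain : ∀ (N : Nat) (x : Int), x.natAbs ≤ N → x ≠ 0 →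
    ∀ pos : Int, pvLoopA x pos = pos - 1 + ((PySem.Int.bitLength (PySem.Int.band x (-x)) : Nat) : Int) := by
  intro N
  induction N with
  | zero => intro x h hx; omega
  | succ N ih =>
    intro x h hx pos
    have hmod : PySem.Int.band x 1 = x % 2 := by
      rw [PySem.Int.band_one]
      show x.fmod 2 = x % 2
      exact pvFmodTwo x
    rcases Int.emod_two_eq x with he | ho
    · -- even x: one loop step, and band/bitLength peel one factor of two
      obtain ⟨a, rfl⟩ : ∃ a, x = 2 * a := ⟨x / 2, by omega⟩
      have ha : a ≠ 0 := by omega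
      rw [pvLoopA, dif_neg hx, dif_pos (by rw [hmod]; omega)]
      have hs : (2 * a) >>> (1 : Nat) = a := by
        cases a with
        | ofNat k =>
          have h1 : (2 : Int) * Int.ofNat k = Int.ofNat (2 * k) := by
            rw [Int.ofNat_eq_natCast, Int.ofNat_eq_natCast]; push_cast; ring
          rw [h1]
          show Int.ofNat ((2 * k) >>> 1) = Int.ofNat k
          rw [Nat.shiftRight_succ, Nat.shiftRight_zero]
          congr 1
          omega
        | negSucc k =>
          have h1 : (2 : Int) * Int.negSucc k = Int.negSucc (2 * k + 1) := by
            rw [Int.negSucc_eq, Int.negSucc_eq]; push_cast; ring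
          rw [h1]
          show Int.negSucc ((2 * k + 1) >>> 1) = Int.negSucc k
          rw [Nat.shiftRight_succ, Nat.shiftRight_zero]
          congr 1
          omega
      rw [hs, ih a (by omega) ha (pos + 1), pvBandNegDouble]
      have hk : 0 < PySem.Int.band a (-a) := pvBandNegPos a ha
      have hd : PySem.Int.floordiv (2 * PySem.Int.band a (-a)) 2 = PySem.Int.band a (-a) := by
        show Int.fdiv _ 2 = _
        rw [pvFdivTwo]
        omega
      have hbl : PySem.Int.bitLength (2 * PySem.Int.band a (-a))
          = PySem.Int.bitLength (PySem.Int.band a (-a)) + 1 := by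
        rw [PySem.Int.bitLength_of_pos (by omega), hd]
      rw [hbl]
      push_cast
      ring
    · -- odd x: the loop stops at once, and x AND -x = 1
      rw [pvLoopA, dif_neg hx, dif_neg (by rw [hmod]; omega)]
      rw [pvBandNegOdd x ho]
      have : PySem.Int.bitLength 1 = 1 := by decide
      rw [this]
      omega

-- distinct integers have a nonzero Python xor
theorem pvBxorNe (m n : Int) (h : m ≠ n) : PySem.Int.bxor m n ≠ 0 := by
  unfold PySem.Int.bxor
  by_cases hm : 0 ≤ m <;> by_cases hn : 0 ≤ n
  · rw [if_pos hm, if_pos hn]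
    intro hc
    have : m.toNat ^^^ n.toNat = 0 := by omega
    have : m.toNat = n.toNat := Nat.xor_eq_zero_iff.mp this
    omega
  · rw [if_pos hm, if_neg hn]
    intro hc
    omega
  · rw [if_neg hm, if_pos hn]
    intro hc
    omega
  · rw [if_neg hm, if_neg hn]
    intro hc
    have : (-m - 1).toNat ^^^ (-n - 1).toNat = 0 := by omega
    have : (-m - 1).toNat = (-n - 1).toNat := Nat.xor_eq_zero_iff.mp this
    omega

-- ===== VERDICT (by name: the statement is the Claim_ definition above) =====
theorem posOfRightMostDiffBit_spec : Claim_equal_posOfRightMostDiffBit := by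
  intro m n _
  unfold Spec_posOfRightMostDiffBit posOfRightMostDiffBit posOfRightMostDiffBit_alt
  by_cases h : m = n
  · simp [h]
  · rw [if_neg h, if_neg h]
    have hx : PySem.Int.bxor m n ≠ 0 := pvBxorNe m n h
    show pvLoopA (PySem.Int.bxor m n) 1
        = ((PySem.Int.bitLength (PySem.Int.band (PySem.Int.bxor m n) (-(PySem.Int.bxor m n))) : Nat) : Int)
    rw [pvMain (PySem.Int.bxor m n).natAbs (PySem.Int.bxor m n) le_rfl hx 1]
    omega
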